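-- pv_equiv track=rewrite | github.com/tbarabosch/apihash_to_yara | hash_functions.py | playWith0xe8677835Hash
-- ===== SOURCE A (Python) =====
-- def playWith0xe8677835Hash(inString,fName):
--     val = 0xFFFFFFFF
--     for i in inString:
--         val ^= ord(i)
--         for j in range(0, 8):
--             if (val&0x1) == 1:
--                 val ^= 0xe8677835
--             val >>= 1
--     return val ^ 0xFFFFFFFF
-- ===== SOURCE B (Python) =====
-- def _crc_step8(n):
--     for _ in range(8):
--         if n & 1:
--             n ^= 0xe8677835
--         n >>= 1
--     return n
--
-- _TABLE = [_crc_step8(n) for n in range(256)]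
--
-- def playWith0xe8677835Hash(inString, fName):
--     val = 0xFFFFFFFF
--     for ch in inString:
--         val ^= ord(ch)
--         val = (val >> 8) ^ _TABLE[val & 0xff]
--     return val ^ 0xFFFFFFFF
-- ===== Notes on version B (the rewrite author's own statement) =====
-- stated objective: faster
-- what changed: Replaces the per-bit inner shift/XOR loop with a precomputed 256-entry CRC table, so each character costs one shift and one table lookup.
import Mathlib
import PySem

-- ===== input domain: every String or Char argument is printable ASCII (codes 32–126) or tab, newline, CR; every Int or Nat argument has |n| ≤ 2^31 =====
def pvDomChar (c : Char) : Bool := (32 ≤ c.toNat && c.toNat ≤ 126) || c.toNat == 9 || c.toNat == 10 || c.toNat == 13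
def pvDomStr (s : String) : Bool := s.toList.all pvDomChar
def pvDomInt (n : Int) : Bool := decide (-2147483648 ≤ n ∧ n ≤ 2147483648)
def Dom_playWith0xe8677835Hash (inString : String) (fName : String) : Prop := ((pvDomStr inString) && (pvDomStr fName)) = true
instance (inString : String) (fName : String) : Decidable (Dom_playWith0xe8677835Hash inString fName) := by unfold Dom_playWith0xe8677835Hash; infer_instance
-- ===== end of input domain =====

-- B replaces A's per-bit inner loop by a precomputed 256-entry CRC table (one lookup per character); return values proven equal.

-- ===== PORT A =====
-- literal transliteration of A: per character XOR in ord, then 8 shift/XOR bit steps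
def playWith0xe8677835Hash (inString : String) (fName : String) : Int :=
  let val : Nat :=
    inString.toList.foldl (fun val i =>
      let val := val ^^^ i.toNat
      (List.range 8).foldl (fun val _ =>
        let val := if val &&& 1 = 1 then val ^^^ 0xe8677835 else val
        val >>> 1) val)
    0xFFFFFFFF
  ((val ^^^ 0xFFFFFFFF : Nat) : Int)

-- ===== PORT B =====
-- Source B's _crc_step8: the 8-iteration bit loop applied to one table index
def pvCrcStep8 (n : Nat) : Nat :=
  (List.range 8).foldl (fun n _ =>
    let n := if n &&& 1 = 1 then n ^^^ 0xe8677835 else n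
    n >>> 1) n

-- Source B's _TABLE
def pvTable : List Nat := (List.range 256).map pvCrcStep8

-- table-driven loop: val ^= ord(ch); val = (val >> 8) ^ _TABLE[val & 0xff]
def playWith0xe8677835Hash_alt (inString : String) (fName : String) : Int :=
  let val : Nat :=
    inString.toList.foldl (fun val ch =>
      let v := val ^^^ ch.toNat
      (v >>> 8) ^^^ pvTable.getD (v &&& 0xff) 0)
    0xFFFFFFFF
  ((val ^^^ 0xFFFFFFFF : Nat) : Int)

-- ===== PRECONDITION & SPEC =====
def Spec_playWith0xe8677835Hash (inString : String) (fName : String) (out : Int) : Prop := out = playWith0xe8677835Hash_alt inString fName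
instance (inString : String) (fName : String) (out : Int) : Decidable (Spec_playWith0xe8677835Hash inString fName out) := by unfold Spec_playWith0xe8677835Hash; infer_instance

-- ===== CLAIM (what is proved, stated in full; the proofs are below) =====
def Claim_equal_playWith0xe8677835Hash : Prop := ∀ (inString : String) (fName : String), Dom_playWith0xe8677835Hash inString fName → Spec_playWith0xe8677835Hash inString fName (playWith0xe8677835Hash inString fName)

-- ===== LEMMAS AND PROOFS =====

-- one bit step of the CRC loop
def pvStep (v : Nat) : Nat := (if v &&& 1 = 1 then v ^^^ 0xe8677835 else v) >>> 1

theorem pvCrcStep8_eq (n : Nat) :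
    pvCrcStep8 n = pvStep (pvStep (pvStep (pvStep (pvStep (pvStep (pvStep (pvStep n))))))) := by
  simp [pvCrcStep8, pvStep, List.range_succ]

-- the bit step is linear over XOR
theorem pvStep_xor (a b : Nat) : pvStep (a ^^^ b) = pvStep a ^^^ pvStep b := by
  unfold pvStep
  have hab : (a ^^^ b) &&& 1 = (a &&& 1) ^^^ (b &&& 1) := Nat.and_xor_distrib_right
  have ha := Nat.and_one_is_mod a
  have hb := Nat.and_one_is_mod b
  rcases Nat.mod_two_eq_zero_or_one a with h1 | h1 <;>
  rcases Nat.mod_two_eq_zero_or_one b with h2 | h2 <;>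
    simp [hab, ha, hb, h1, h2, Nat.shiftRight_xor_distrib, Nat.xor_assoc,
      Nat.xor_comm, Nat.xor_left_comm]

theorem pvCrcStep8_xor (a b : Nat) : pvCrcStep8 (a ^^^ b) = pvCrcStep8 a ^^^ pvCrcStep8 b := by
  simp [pvCrcStep8_eq, pvStep_xor]

theorem pvStep_shiftLeft (x : Nat) : pvStep (x <<< 1) = x := by
  unfold pvStep
  have h1 : (x <<< 1) &&& 1 = 0 := by
    simp [Nat.shiftLeft_eq, Nat.and_one_is_mod]
  simp [Nat.shiftLeft_eq, Nat.shiftRight_eq_div_pow]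

theorem pvStep_shiftLeft_succ (x k : Nat) : pvStep (x <<< (k + 1)) = x <<< k := by
  rw [show x <<< (k + 1) = (x <<< k) <<< 1 from by rw [Nat.shiftLeft_add]]
  exact pvStep_shiftLeft _

theorem pvCrcStep8_shiftLeft (x : Nat) : pvCrcStep8 (x <<< 8) = x := by
  rw [pvCrcStep8_eq, pvStep_shiftLeft_succ, pvStep_shiftLeft_succ, pvStep_shiftLeft_succ,
    pvStep_shiftLeft_succ, pvStep_shiftLeft_succ, pvStep_shiftLeft_succ, pvStep_shiftLeft_succ,
    show x <<< 1 = x <<< (0 + 1) from rfl, pvStep_shiftLeft_succ, Nat.shiftLeft_zero]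

-- any value splits into its high part shifted and its low byte
theorem pvDecompose (v : Nat) : ((v >>> 8) <<< 8) ^^^ (v &&& 255) = v := by
  apply Nat.eq_of_testBit_eq
  intro i
  simp only [Nat.testBit_xor, Nat.testBit_shiftLeft, Nat.testBit_shiftRight, Nat.testBit_and]
  have h255 : Nat.testBit 255 i = decide (i < 8) := by
    have : (255 : Nat) = 2 ^ 8 - 1 := by norm_num
    rw [this, Nat.testBit_two_pow_sub_one]
  rcases Nat.lt_or_ge i 8 with h | h
  · simp [h255, h, Nat.not_le.mpr h]
  · have : 8 + (i - 8) = i := by omega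
    simp [h255, this, Nat.not_lt.mpr h, h]

theorem pvTable_getD (i : Nat) (h : i < 256) : pvTable.getD i 0 = pvCrcStep8 i := by
  simp [pvTable, List.getD_eq_getElem?_getD, h]

-- one character of the table-driven loop equals the 8 bit steps
theorem pvChar_eq (v : Nat) : (v >>> 8) ^^^ pvTable.getD (v &&& 255) 0 = pvCrcStep8 v := by
  have hlt : v &&& 255 < 256 := by
    have : v &&& 255 ≤ 255 := Nat.and_le_right
    omega
  rw [pvTable_getD _ hlt]
  conv_rhs => rw [← pvDecompose v]
  rw [pvCrcStep8_xor, pvCrcStep8_shiftLeft]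

theorem pvFold_eq (l : List Char) (acc : Nat) :
    l.foldl (fun val i =>
      let val := val ^^^ i.toNat
      (List.range 8).foldl (fun val _ =>
        let val := if val &&& 1 = 1 then val ^^^ 0xe8677835 else val
        val >>> 1) val) acc
    = l.foldl (fun val ch =>
        let v := val ^^^ ch.toNat
        (v >>> 8) ^^^ pvTable.getD (v &&& 0xff) 0) acc := by
  induction l generalizing acc with
  | nil => rfl
  | cons c l ih =>
    simp only [List.foldl_cons]
    rw [← ih]
    congr 1
    exact (pvChar_eq (acc ^^^ c.toNat)).symm

-- ===== VERDICT (by name: the statement is the Claim_ definition above) =====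
theorem playWith0xe8677835Hash_spec : Claim_equal_playWith0xe8677835Hash := by
  intro inString fName _
  unfold Spec_playWith0xe8677835Hash playWith0xe8677835Hash playWith0xe8677835Hash_alt
  rw [pvFold_eq]
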